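-- pv_equiv track=rewrite | github.com/aitrail001/words-v2 | tools/lexicon/enrichment_benchmark.py | _summarize_category_counts
-- ===== SOURCE A (Python) =====
-- def _summarize_category_counts(words: list[str], metadata: dict[str, str]) -> dict[str, int]:
--     counts: dict[str, int] = {}
--     for word in words:
--         category = metadata.get(word)
--         if not category:
--             continue
--         counts[category] = counts.get(category, 0) + 1
--     return dict(sorted(counts.items()))
-- ===== SOURCE B (Python) =====
-- def _summarize_category_counts(words: list[str], metadata: dict[str, str]) -> dict[str, int]:
--     cats = sorted(c for c in (metadata.get(w) for w in words) if c)
--     result: dict[str, int] = {}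
--     rest = cats
--     while rest:
--         head = rest[0]
--         run = 1
--         while run < len(rest) and rest[run] == head:
--             run += 1
--         result[head] = run
--         rest = rest[run:]
--     return result
-- ===== Notes on version B (the rewrite author's own statement) =====
-- stated objective: alternative
-- what changed: B replaces A's incremental dict-of-counts with sort-then-scan: it sorts the filtered category list once and emits each maximal run of equal categories as (key, run length), so no counting dictionary is ever built and sorted keys fall out of the scan order.
import Mathlib
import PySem

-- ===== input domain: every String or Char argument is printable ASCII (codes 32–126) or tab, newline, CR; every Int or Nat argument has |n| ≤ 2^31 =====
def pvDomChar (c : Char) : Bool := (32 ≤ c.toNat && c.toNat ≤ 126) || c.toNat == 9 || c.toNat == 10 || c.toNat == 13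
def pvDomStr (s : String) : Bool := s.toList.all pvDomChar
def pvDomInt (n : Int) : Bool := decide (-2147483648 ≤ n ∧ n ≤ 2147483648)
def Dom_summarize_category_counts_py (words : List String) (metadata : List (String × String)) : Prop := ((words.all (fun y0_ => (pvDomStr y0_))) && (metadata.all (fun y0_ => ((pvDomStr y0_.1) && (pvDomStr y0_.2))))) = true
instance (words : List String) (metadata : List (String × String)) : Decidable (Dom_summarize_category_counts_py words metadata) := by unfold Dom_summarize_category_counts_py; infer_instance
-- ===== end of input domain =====

-- B replaces A's incremental dict-of-counts with sort-then-scan: sort the filtered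
-- category list once, then emit each maximal run of equal categories as (key, run length).

-- ===== PORT A =====
def summarize_category_counts_py (words : List String) (metadata : List (String × String)) : List (String × Int) :=
  let md : PySem.Dict String String := PySem.Dict.mk metadata
  let counts : PySem.Dict String Int :=
    words.foldl (fun counts word =>
      match md.get? word with
      | none => counts                                  -- 'if not category: continue' (None)
      | some category =>
          if category = "" then counts                  -- 'if not category: continue' (empty string)
          else counts.insert category (counts.getD category 0 + 1))
      PySem.Dict.empty
  -- dict(sorted(counts.items())): keys are distinct, so tuple order = order by key
  PySem.List.sorted counts.items (fun p => p.1) false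

-- ===== PORT B =====
-- the 'while rest: head = rest[0]; run = 1 + <inner while counting equal elements>;
-- result[head] = run; rest = rest[run:]' loop of Source B: the inner while computes the
-- takeWhile length, rest[run:] is the corresponding dropWhile
def pvRunScan : List String → List (String × Int)
  | [] => []
  | x :: xs =>
      let run : Int := ((xs.takeWhile (fun y => y == x)).length : Int) + 1
      (x, run) :: pvRunScan (xs.dropWhile (fun y => y == x))
termination_by l => l.length
decreasing_by
  simp only [List.length_cons]
  exact Nat.lt_succ_of_le (List.length_dropWhile_le _ _)

def summarize_category_counts_py_alt (words : List String) (metadata : List (String × String)) : List (String × Int) :=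
  let md : PySem.Dict String String := PySem.Dict.mk metadata
  let cats : List String :=
    PySem.List.sorted (words.filterMap (fun w =>
      match md.get? w with
      | some c => if c = "" then none else some c
      | none => none)) (fun x => x) false
  pvRunScan cats

-- ===== PRECONDITION & SPEC =====
def Spec_summarize_category_counts_py (words : List String) (metadata : List (String × String)) (out : List (String × Int)) : Prop := out = summarize_category_counts_py_alt words metadata
instance (words : List String) (metadata : List (String × String)) (out : List (String × Int)) : Decidable (Spec_summarize_category_counts_py words metadata out) := by unfold Spec_summarize_category_counts_py; infer_instance

-- ===== CLAIM (what is proved, stated in full; the proofs are below) =====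
def Claim_equal_summarize_category_counts_py : Prop := ∀ (words : List String) (metadata : List (String × String)), Dom_summarize_category_counts_py words metadata → Spec_summarize_category_counts_py words metadata (summarize_category_counts_py words metadata)

-- ===== LEMMAS AND PROOFS =====

-- A's 'lookup, maybe skip, else update' loop equals the count-update loop over the
-- filterMap of the (lookup + truthiness) step, for any accumulator
theorem fold_counts_go (md : PySem.Dict String String) (words : List String) :
    ∀ (acc : PySem.Dict String Int),
    words.foldl (fun counts word =>
      match md.get? word with
      | none => counts
      | some category =>
          if category = "" then counts
          else counts.insert category (counts.getD category 0 + 1)) acc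
    = (words.filterMap (fun w =>
        match md.get? w with
        | some c => if c = "" then none else some c
        | none => none)).foldl (fun d x => d.insert x (d.getD x 0 + 1)) acc := by
  induction words with
  | nil => intro acc; rfl
  | cons w ws ih =>
    intro acc
    simp only [List.foldl_cons, List.filterMap_cons]
    cases md.get? w with
    | none => exact ih acc
    | some c =>
      by_cases h : c = "" <;> simp only [h, if_pos] <;>
        first
          | exact ih acc
          | exact ih (acc.insert c (acc.getD c 0 + 1))

theorem counts_eq_counter (words : List String) (md : PySem.Dict String String) :
    words.foldl (fun counts word =>
      match md.get? word with
      | none => counts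
      | some category =>
          if category = "" then counts
          else counts.insert category (counts.getD category 0 + 1))
      (PySem.Dict.empty : PySem.Dict String Int)
    = PySem.Dict.counter (words.filterMap (fun w =>
        match md.get? w with
        | some c => if c = "" then none else some c
        | none => none)) := by
  rw [← PySem.Dict.foldl_insert_getD_add_one_eq_counter]
  exact fold_counts_go md words PySem.Dict.empty

-- on a ≤-sorted list, the run-length scan yields exactly (first occurrence of k, count of k),
-- with strictly increasing keys
-- all elements after the dropped prefix are strictly greater than the head
theorem lt_of_mem_dropWhile (x : String) (xs : List String) (h1 : ∀ z ∈ xs, x ≤ z)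
    (h2 : xs.Pairwise (· ≤ ·)) : ∀ z ∈ xs.dropWhile (fun y => y == x), x < z := by
  cases hd : xs.dropWhile (fun y => y == x) with
  | nil => intro z hz; simp at hz
  | cons y d' =>
    have hsub : (xs.dropWhile (fun y => y == x)).Sublist xs := List.dropWhile_sublist _
    have hy_ne : (y == x) = false := by
      have := List.head_dropWhile_not (fun y => y == x) (l := xs) (by simp [hd])
      simpa [hd] using this
    have hy_mem : y ∈ xs := hsub.mem (by simp [hd])
    have hxy : x < y := lt_of_le_of_ne (h1 y hy_mem) (Ne.symm (ne_of_beq_false hy_ne))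
    have hpd : (y :: d').Pairwise (· ≤ ·) := by rw [← hd]; exact h2.sublist hsub
    intro z hz
    rcases List.mem_cons.mp hz with rfl | hz'
    · exact hxy
    · exact lt_of_lt_of_le hxy ((List.pairwise_cons.mp hpd).1 z hz')

theorem ofList_all_eq (x : String) : ∀ (t : List String), (∀ y ∈ t, y = x) →
    t.foldl PySem.Set.add [x] = [x] := by
  intro t
  induction t with
  | nil => intro _; rfl
  | cons y t' ih =>
    intro h
    have hy : y = x := h y (by simp)
    simp only [List.foldl_cons, hy, PySem.Set.add_of_mem (by simp : x ∈ [x])]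
    exact ih (fun z hz => h z (by simp [hz]))

theorem pvRunScan_spec : ∀ (l : List String), l.Pairwise (· ≤ ·) →
    pvRunScan l = (PySem.Set.ofList l).map (fun k => (k, (l.count k : Int))) ∧
    (pvRunScan l).Pairwise (fun a b => a.1 < b.1) := by
  intro l
  induction l using pvRunScan.induct with
  | case1 => intro _; exact ⟨by simp [pvRunScan], by simp [pvRunScan]⟩
  | case2 x xs ih =>
    intro h
    rw [pvRunScan]
    have h1 : ∀ z ∈ xs, x ≤ z := (List.pairwise_cons.mp h).1
    have h2 : xs.Pairwise (· ≤ ·) := (List.pairwise_cons.mp h).2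
    set t := xs.takeWhile (fun y => y == x) with ht
    set d := xs.dropWhile (fun y => y == x) with hdd
    have hsplit : t ++ d = xs := List.takeWhile_append_dropWhile
    have ht_all : ∀ y ∈ t, y = x := fun y hy => by
      simpa using List.mem_takeWhile_imp hy
    have hd_lt : ∀ z ∈ d, x < z := lt_of_mem_dropWhile x xs h1 h2
    have hx_nd : x ∉ d := fun hx => lt_irrefl x (hd_lt x hx)
    have hd_pw : d.Pairwise (· ≤ ·) := h2.sublist (List.dropWhile_sublist _)
    obtain ⟨ihe, ihp⟩ := ih hd_pw
    -- counts
    have hcount_t : t.count x = t.length := List.count_eq_length.mpr (fun b hb => (ht_all b hb).symm)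
    have hcount_d : d.count x = 0 := List.count_eq_zero.mpr hx_nd
    have hcount : (x :: xs).count x = t.length + 1 := by
      rw [List.count_cons_self, ← hsplit, List.count_append, hcount_t, hcount_d]
    -- set of the cons list
    have hofl_t : PySem.Set.ofList (x :: t) = [x] := by
      rw [PySem.Set.ofList_eq_foldl]
      simp only [List.foldl_cons]
      exact ofList_all_eq x t ht_all
    have hofl : PySem.Set.ofList (x :: xs) = x :: PySem.Set.ofList d := by
      have : x :: xs = (x :: t) ++ d := by rw [List.cons_append, hsplit]
      rw [this, PySem.Set.ofList_append, hofl_t, PySem.Set.update_eq_append_filter]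
      have : (PySem.Set.ofList d).filter (fun y => !(PySem.Set.contains [x] y)) = PySem.Set.ofList d := by
        apply List.filter_eq_self.mpr
        intro y hy
        have hy_ne : y ≠ x := fun he => hx_nd (he ▸ ((PySem.Set.mem_ofList _ _).mp hy))
        simp [PySem.Set.contains, hy_ne]
      rw [this]
      rfl
    -- counts of other keys
    have hcount_k : ∀ k ∈ PySem.Set.ofList d, (x :: xs).count k = d.count k := by
      intro k hk
      have hk_d : k ∈ d := (PySem.Set.mem_ofList _ _).mp hk
      have hk_ne : k ≠ x := fun he => lt_irrefl x (he ▸ hd_lt k hk_d)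
      have hk_nt : k ∉ t := fun hkt => hk_ne (ht_all k hkt)
      rw [List.count_cons_of_ne (Ne.symm hk_ne), ← hsplit, List.count_append,
        List.count_eq_zero.mpr hk_nt, Nat.zero_add]
    constructor
    · show (x, ((t.length : Int) + 1)) :: pvRunScan d = _
      rw [hofl, List.map_cons, ihe, hcount]
      refine List.cons_eq_cons.mpr ⟨?_, ?_⟩
      · simp
      · exact List.map_congr_left (fun k hk => by rw [hcount_k k hk])
    · refine List.pairwise_cons.mpr ⟨?_, ihp⟩
      intro p hp
      rw [ihe] at hp
      obtain ⟨k, hk, rfl⟩ := List.mem_map.mp hp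
      exact hd_lt k ((PySem.Set.mem_ofList _ _).mp hk)

theorem summarize_category_counts_py_eq_alt (words : List String) (metadata : List (String × String)) :
    summarize_category_counts_py words metadata = summarize_category_counts_py_alt words metadata := by
  unfold summarize_category_counts_py summarize_category_counts_py_alt
  dsimp only
  rw [counts_eq_counter]
  set cats := words.filterMap (fun w =>
      match (PySem.Dict.mk metadata).get? w with
      | some c => if c = "" then none else some c
      | none => none) with hcats
  set s := PySem.List.sorted cats (fun x => x) false with hs
  have hpw : s.Pairwise (· ≤ ·) := PySem.List.sorted_pairwise cats (fun x => x) 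
  obtain ⟨he, hp⟩ := pvRunScan_spec s hpw
  rw [PySem.Dict.items_counter]
  apply PySem.List.sorted_eq_of_perm_of_pairwise_lt
  · rw [he]
    have hperm : s.Perm cats := PySem.List.sorted_perm cats (fun x => x) false
    have hof : (PySem.Set.ofList s).Perm (PySem.Set.ofList cats) :=
      (List.perm_ext_iff_of_nodup (PySem.Set.nodup_ofList _) (PySem.Set.nodup_ofList _)).mpr
        (fun a => by rw [PySem.Set.mem_ofList, PySem.Set.mem_ofList, hperm.mem_iff])
    have hmc : (PySem.Set.ofList s).map (fun k => (k, (s.count k : Int)))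
        = (PySem.Set.ofList s).map (fun k => (k, (cats.count k : Int))) :=
      List.map_congr_left (fun k _ => by rw [hperm.count_eq])
    rw [hmc]
    exact hof.map _
  · exact hp

-- ===== VERDICT (by name: the statement is the Claim_ definition above) =====
theorem summarize_category_counts_py_spec : Claim_equal_summarize_category_counts_py := by
  intro words metadata _
  exact summarize_category_counts_py_eq_alt words metadata
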